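-- pv_equiv track=rewrite | github.com/itsaddyon/sidechick | app.py | has_severe_abuse
-- ===== SOURCE A (Python) =====
-- def has_severe_abuse(text):
--     t = text.lower()
--     severe_patterns = [
--         "rape", "i will rape", "force you", "pin you down",
--         "i know where you live", "come find you", "you will regret this",
--         "i will hurt you", "i will kill you"
--     ]
--     return any(pattern in t for pattern in severe_patterns)
-- ===== SOURCE B (Python) =====
-- _SEVERE = (
--     "rape", "i will rape", "force you", "pin you down",
--     "i know where you live", "come find you", "you will regret this",
--     "i will hurt you", "i will kill you",
-- )
--
-- def has_severe_abuse(text):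
--     t = text.lower()
--     return any(t.startswith(_SEVERE, i) for i in range(len(t)))
-- ===== Notes on version B (the rewrite author's own statement) =====
-- stated objective: alternative
-- what changed: Instead of nine independent whole-text substring membership scans, B makes a single left-to-right positional sweep over the lowercased text, testing at each position whether any severe phrase starts there via str.startswith with a tuple of patterns and an offset.
import Mathlib
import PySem

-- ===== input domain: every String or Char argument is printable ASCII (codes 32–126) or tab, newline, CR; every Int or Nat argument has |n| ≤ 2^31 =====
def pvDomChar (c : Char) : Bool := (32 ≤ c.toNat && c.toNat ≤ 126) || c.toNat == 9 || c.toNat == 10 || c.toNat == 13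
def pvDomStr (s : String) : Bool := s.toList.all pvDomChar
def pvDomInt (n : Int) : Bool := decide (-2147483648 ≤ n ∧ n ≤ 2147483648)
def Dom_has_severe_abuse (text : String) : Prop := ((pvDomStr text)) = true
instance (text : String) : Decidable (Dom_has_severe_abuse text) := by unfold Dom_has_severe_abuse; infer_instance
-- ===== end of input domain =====

-- B replaces A's nine independent whole-text substring scans by a single
-- left-to-right positional sweep that tests at each position whether any
-- severe phrase starts there (alternative decomposition, same cost).


-- ===== PORT A =====
def severePatternsA : List String :=
  ["rape", "i will rape", "force you", "pin you down",
   "i know where you live", "come find you", "you will regret this",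
   "i will hurt you", "i will kill you"]

def has_severe_abuse (text : String) : Bool :=
  let t := PySem.Str.lower text
  severePatternsA.any (fun pattern => PySem.Str.isIn pattern t)

-- ===== PORT B =====
-- B's tuple of patterns, on the character-list side.
def severePatternsB : List (List Char) :=
  ["rape".toList, "i will rape".toList, "force you".toList, "pin you down".toList,
   "i know where you live".toList, "come find you".toList, "you will regret this".toList,
   "i will hurt you".toList, "i will kill you".toList]

-- the generator 't.startswith(_SEVERE, i) for i in range(len(t))': structural
-- recursion over the suffixes of t (position i ↦ suffix t[i:]).
def scanSevere : List Char → Bool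
  | [] => false
  | c :: rest =>
      severePatternsB.any (fun p => PySem.Chars.startswith (c :: rest) p) || scanSevere rest

def has_severe_abuse_alt (text : String) : Bool :=
  scanSevere (PySem.Chars.lower text.toList)

-- ===== PRECONDITION & SPEC =====
def Spec_has_severe_abuse (text : String) (out : Bool) : Prop := out = has_severe_abuse_alt text
instance (text : String) (out : Bool) : Decidable (Spec_has_severe_abuse text out) := by unfold Spec_has_severe_abuse; infer_instance

-- ===== CLAIM (what is proved, stated in full; the proofs are below) =====
def Claim_equal_has_severe_abuse : Prop := ∀ (text : String), Dom_has_severe_abuse text → Spec_has_severe_abuse text (has_severe_abuse text)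

-- ===== LEMMAS AND PROOFS =====

lemma severePatternsB_eq : severePatternsB = severePatternsA.map String.toList := by
  decide

lemma severePatternsB_ne_nil : ∀ p ∈ severePatternsB, p ≠ [] := by
  decide

-- B's sweep finds a hit iff some pattern is a prefix of some suffix.
lemma scanSevere_iff (s : List Char) :
    scanSevere s = true ↔ ∃ p ∈ severePatternsB, ∃ j, p <+: s.drop j := by
  induction s with
  | nil =>
      simp only [scanSevere]
      constructor
      · intro h; cases h
      rintro ⟨p, hp, j, hpre⟩
      have : p = [] := List.prefix_nil.mp (by simpa using hpre)
      exact absurd this (severePatternsB_ne_nil p hp)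
  | cons c rest ih =>
      simp only [scanSevere, Bool.or_eq_true, List.any_eq_true, ih]
      constructor
      · rintro (⟨p, hp, hsw⟩ | ⟨p, hp, j, hpre⟩)
        · exact ⟨p, hp, 0, by simpa using (PySem.Chars.startswith_iff _ _).mp hsw⟩
        · exact ⟨p, hp, j + 1, by simpa using hpre⟩
      · rintro ⟨p, hp, j, hpre⟩
        cases j with
        | zero =>
            exact Or.inl ⟨p, hp, (PySem.Chars.startswith_iff _ _).mpr (by simpa using hpre)⟩
        | succ j =>
            exact Or.inr ⟨p, hp, j, by simpa using hpre⟩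

-- ===== VERDICT (by name: the statement is the Claim_ definition above) =====
theorem has_severe_abuse_spec : Claim_equal_has_severe_abuse := by
  intro text _
  show has_severe_abuse text = has_severe_abuse_alt text
  unfold has_severe_abuse has_severe_abuse_alt
  rw [Bool.eq_iff_iff]
  rw [scanSevere_iff, severePatternsB_eq]
  simp only [List.any_eq_true, List.mem_map]
  constructor
  · rintro ⟨p, hp, hin⟩
    have hinf := (PySem.Str.isIn_iff_infix _ _).mp hin
    have : (PySem.Str.lower text).toList = PySem.Chars.lower text.toList := by
      simp [PySem.Str.toList_lower]
    rw [this] at hinf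
    obtain ⟨j, hj⟩ := (PySem.Chars.exists_prefix_drop_iff_isIn _ _).mpr
      ((PySem.Chars.isIn_iff_infix _ _).mpr hinf)
    exact ⟨p.toList, ⟨p, hp, rfl⟩, j, hj⟩
  · rintro ⟨q, ⟨p, hp, rfl⟩, j, hj⟩
    refine ⟨p, hp, (PySem.Str.isIn_iff_infix _ _).mpr ?_⟩
    have : (PySem.Str.lower text).toList = PySem.Chars.lower text.toList := by
      simp [PySem.Str.toList_lower]
    rw [this]
    exact (PySem.Chars.isIn_iff_infix _ _).mp
      ((PySem.Chars.exists_prefix_drop_iff_isIn _ _).mp ⟨j, hj⟩)
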